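-- pv_equiv track=rewrite | github.com/TYjacoby71/BatchTrack | migrations/versions/0021_recipe_lineage_backfill.py | _resolve_root_id
-- ===== SOURCE A (Python) =====
-- def _resolve_root_id(recipe_id: int, recipes: dict[int, dict], seen: set[int]) -> int:
--     if recipe_id in seen:
--         return recipe_id
--     seen.add(recipe_id)
--     recipe = recipes.get(recipe_id)
--     if not recipe:
--         return recipe_id
--     root_id = recipe.get("root_recipe_id")
--     if root_id:
--         return int(root_id)
--     parent_id = recipe.get("parent_recipe_id")
--     if parent_id:
--         return _resolve_root_id(int(parent_id), recipes, seen)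
--     return recipe_id
-- ===== SOURCE B (Python) =====
-- def _resolve_root_id(recipe_id: int, recipes: dict[int, dict], seen: set[int]) -> int:
--     # Different decomposition: first normalize every recipe row into a flat link
--     # table (truthy root/parent or None; None for an empty/falsy row), then walk
--     # the chain with a bounded iterative loop instead of self-recursion.
--     # `seen` is mutated at the same point of each step, so the side effect on the
--     # caller's set is identical.
--     links = {
--         rid: ((rec.get("root_recipe_id") or None, rec.get("parent_recipe_id") or None)
--               if rec else None)
--         for rid, rec in recipes.items()
--     }
--     for _ in range(len(recipes) + 1):
--         if recipe_id in seen: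
--             return recipe_id
--         seen.add(recipe_id)
--         link = links.get(recipe_id)
--         if link is None:
--             return recipe_id
--         root, parent = link
--         if root is not None:
--             return int(root)
--         if parent is None:
--             return recipe_id
--         recipe_id = int(parent)
--     return recipe_id  # unreachable: every iteration adds a distinct recipes key to seen
-- ===== Notes on version B (the rewrite author's own statement) =====
-- stated objective: alternative
-- what changed: The self-recursive walk is replaced by a staged design: a normalized link table (truthy root/parent per recipe) is built once, then a bounded iterative loop walks the chain over that table with no recursion.
import Mathlib
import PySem

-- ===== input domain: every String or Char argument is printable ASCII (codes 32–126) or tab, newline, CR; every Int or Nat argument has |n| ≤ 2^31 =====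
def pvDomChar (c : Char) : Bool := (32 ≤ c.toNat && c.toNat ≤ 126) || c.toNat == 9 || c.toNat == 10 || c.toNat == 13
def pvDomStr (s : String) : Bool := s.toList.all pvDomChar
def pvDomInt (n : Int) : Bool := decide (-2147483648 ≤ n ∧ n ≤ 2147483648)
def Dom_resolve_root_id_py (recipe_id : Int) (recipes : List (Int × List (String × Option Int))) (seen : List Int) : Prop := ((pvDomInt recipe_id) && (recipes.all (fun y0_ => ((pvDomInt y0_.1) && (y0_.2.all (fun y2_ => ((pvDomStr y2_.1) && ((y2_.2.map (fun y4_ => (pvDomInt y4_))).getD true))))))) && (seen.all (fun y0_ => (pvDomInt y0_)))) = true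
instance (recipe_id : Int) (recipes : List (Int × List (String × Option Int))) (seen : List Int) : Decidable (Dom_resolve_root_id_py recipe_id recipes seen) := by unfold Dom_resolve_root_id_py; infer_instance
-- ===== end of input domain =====

-- B builds a normalized link table once and walks it with a bounded iterative loop instead of
-- A's self-recursion; both mutate the caller's `seen` set identically in Python (the theorems
-- below are about the return value).

-- ===== PORT A =====
-- Python truthiness of a stored int-or-None value ('if x:'): false for None and 0.
def pyTruthyInt (o : Option Int) : Bool :=
  match o with
  | some n => n != 0
  | none => false

-- termination measure for the chain walk: recipes keys not yet in `seen`
def pvMeasure (recipes : List (Int × List (String × Option Int))) (seen : List Int) : Nat :=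
  recipes.countP (fun p => !(PySem.Set.contains seen p.1))

-- the measure strictly drops when an unseen key is found and added to `seen`
theorem pvMeasure_lt (recipes : List (Int × List (String × Option Int))) (seen : List Int) (rid : Int)
    (hns : PySem.Set.contains seen rid = false)
    (hmem : ∃ p ∈ recipes, p.1 = rid) :
    pvMeasure recipes (PySem.Set.add seen rid) < pvMeasure recipes seen := by
  have hnotin : rid ∉ seen := by simpa [PySem.Set.contains] using hns
  have hadd : PySem.Set.add seen rid = seen ++ [rid] := by
    simp [PySem.Set.add, PySem.Set.contains, hnotin]
  unfold pvMeasure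
  rw [hadd]
  have key : ∀ x : Int, PySem.Set.contains (seen ++ [rid]) x = (PySem.Set.contains seen x || (x == rid)) := by
    intro x
    by_cases hx : x = rid <;> simp [PySem.Set.contains, hx]
  induction recipes with
  | nil => simp at hmem
  | cons q t ih =>
    simp only [List.countP_cons]
    rcases hmem with ⟨p, hp, hp1⟩
    rcases List.mem_cons.mp hp with rfl | hpt
    · have h1 : (!(PySem.Set.contains (seen ++ [rid]) p.1)) = false := by
        simp [hp1]
      have h2 : (!(PySem.Set.contains seen p.1)) = true := by
        rw [hp1]; simp [PySem.Set.contains, hnotin]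
      rw [h1, h2]
      simp only [if_true, if_false, Bool.false_eq_true]
      have hle : t.countP (fun p => !(PySem.Set.contains (seen ++ [rid]) p.1))
          ≤ t.countP (fun p => !(PySem.Set.contains seen p.1)) := by
        apply List.countP_mono_left
        intro a _ ha
        simp only [key, Bool.not_eq_eq_eq_not, Bool.not_true, Bool.or_eq_false_iff] at ha ⊢
        simp_all
      omega
    · by_cases hq : q.1 = rid
      · have h1 : (!(PySem.Set.contains (seen ++ [rid]) q.1)) = false := by
          simp [hq]
        have h2 : (!(PySem.Set.contains seen q.1)) = true := by
          rw [hq]; simp [PySem.Set.contains, hnotin]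
        have hle : t.countP (fun p => !(PySem.Set.contains (seen ++ [rid]) p.1))
            ≤ t.countP (fun p => !(PySem.Set.contains seen p.1)) := by
          apply List.countP_mono_left
          intro a _ ha
          simp only [key, Bool.not_eq_eq_eq_not, Bool.not_true, Bool.or_eq_false_iff] at ha ⊢
          simp_all
        rw [h1, h2]
        simp only [if_true, if_false, Bool.false_eq_true]
        omega
      · have heq : (!(PySem.Set.contains (seen ++ [rid]) q.1)) = (!(PySem.Set.contains seen q.1)) := by
          simp [hq]
        have := ih ⟨p, hpt, hp1⟩
        rw [heq]
        omega

-- literal transliteration of A (self-recursive)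
def resolve_root_id_py (recipe_id : Int) (recipes : List (Int × List (String × Option Int))) (seen : List Int) : Int :=
  if PySem.Set.contains seen recipe_id then recipe_id
  else
    match h : PySem.Dict.get? (PySem.Dict.mk recipes) recipe_id with
    | none => recipe_id
    | some recipe =>
      if recipe.isEmpty then recipe_id
      else
        let root_id := (PySem.Dict.get? (PySem.Dict.mk recipe) "root_recipe_id").getD none
        if pyTruthyInt root_id then root_id.getD 0
        else
          let parent_id := (PySem.Dict.get? (PySem.Dict.mk recipe) "parent_recipe_id").getD none
          if pyTruthyInt parent_id then resolve_root_id_py (parent_id.getD 0) recipes (PySem.Set.add seen recipe_id)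
          else recipe_id
termination_by pvMeasure recipes seen
decreasing_by
  apply pvMeasure_lt
  · simpa using ‹¬ PySem.Set.contains seen recipe_id = true›
  · rcases Option.map_eq_some_iff.mp h with ⟨p, hp, _⟩
    exact ⟨p, List.mem_of_find?_eq_some hp, by simpa using List.find?_some hp⟩

-- ===== PORT B =====
-- "rec.get(k) or None": the stored value if truthy, else None
def pvOrNone (o : Option Int) : Option Int :=
  match o with
  | some n => if n = 0 then none else some n
  | none => none

-- one entry of B's comprehension: the normalized (root, parent) link of a row, None for a falsy row
def pvLink (rec : List (String × Option Int)) : Option (Option Int × Option Int) :=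
  if rec.isEmpty then none
  else some (pvOrNone ((PySem.Dict.get? (PySem.Dict.mk rec) "root_recipe_id").getD none),
             pvOrNone ((PySem.Dict.get? (PySem.Dict.mk rec) "parent_recipe_id").getD none))

-- B's dict comprehension over recipes.items()
def pvLinks (recipes : List (Int × List (String × Option Int))) :
    PySem.Dict Int (Option (Option Int × Option Int)) :=
  PySem.Dict.mk (recipes.map (fun p => (p.1, pvLink p.2)))

-- B's for-loop over range(len(recipes)+1): fuel-indexed iteration, final fallback = recipe_id
def pvBLoop (links : PySem.Dict Int (Option (Option Int × Option Int))) :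
    Nat → Int → List Int → Int
  | 0, rid, _ => rid
  | fuel + 1, rid, seen =>
    if PySem.Set.contains seen rid then rid
    else
      match (PySem.Dict.get? links rid).getD none with
      | none => rid
      | some (root, parent) =>
        match root with
        | some r => r
        | none =>
          match parent with
          | some p => pvBLoop links fuel p (PySem.Set.add seen rid)
          | none => rid

def resolve_root_id_py_alt (recipe_id : Int) (recipes : List (Int × List (String × Option Int))) (seen : List Int) : Int :=
  pvBLoop (pvLinks recipes) (recipes.length + 1) recipe_id seen

-- ===== PRECONDITION & SPEC =====
def Spec_resolve_root_id_py (recipe_id : Int) (recipes : List (Int × List (String × Option Int))) (seen : List Int) (out : Int) : Prop := out = resolve_root_id_py_alt recipe_id recipes seen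
instance (recipe_id : Int) (recipes : List (Int × List (String × Option Int))) (seen : List Int) (out : Int) : Decidable (Spec_resolve_root_id_py recipe_id recipes seen out) := by unfold Spec_resolve_root_id_py; infer_instance

-- ===== CLAIM (what is proved, stated in full; the proofs are below) =====
def Claim_equal_resolve_root_id_py : Prop := ∀ (recipe_id : Int) (recipes : List (Int × List (String × Option Int))) (seen : List Int), Dom_resolve_root_id_py recipe_id recipes seen → Spec_resolve_root_id_py recipe_id recipes seen (resolve_root_id_py recipe_id recipes seen)

-- ===== LEMMAS AND PROOFS =====

-- the link table is a pointwise image of the raw dict (first match preserved)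
theorem links_get (recipes : List (Int × List (String × Option Int))) (rid : Int) :
    PySem.Dict.get? (pvLinks recipes) rid =
      (PySem.Dict.get? (PySem.Dict.mk recipes) rid).map pvLink := by
  unfold pvLinks
  induction recipes with
  | nil => simp [PySem.Dict.get?]
  | cons q t ih =>
    obtain ⟨k, v⟩ := q
    simp only [List.map_cons, PySem.Dict.get?_mk_cons]
    cases hq : (k == rid) <;> simp [ih]

-- fuel sufficiency: with fuel above the measure, B's loop computes A's recursion
theorem loop_eq (recipes : List (Int × List (String × Option Int))) :
    ∀ (fuel : Nat) (rid : Int) (seen : List Int), pvMeasure recipes seen < fuel →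
      pvBLoop (pvLinks recipes) fuel rid seen = resolve_root_id_py rid recipes seen := by
  intro fuel
  induction fuel with
  | zero => intro rid seen h; omega
  | succ fuel ih =>
    intro rid seen hlt
    rw [pvBLoop, resolve_root_id_py]
    by_cases hin : rid ∈ seen
    · simp [PySem.Set.contains, hin]
    · have hc : PySem.Set.contains seen rid = false := by
        simp [PySem.Set.contains, hin]
      simp only [hc, if_false, Bool.false_eq_true]
      rw [links_get]
      cases hget : PySem.Dict.get? (PySem.Dict.mk recipes) rid with
      | none => simp
      | some recipe =>
        simp only [Option.map_some, Option.getD_some]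
        have hmem : ∃ p ∈ recipes, p.1 = rid := by
          rcases Option.map_eq_some_iff.mp hget with ⟨p, hp, _⟩
          exact ⟨p, List.mem_of_find?_eq_some hp, by simpa using List.find?_some hp⟩
        have hm := pvMeasure_lt recipes seen rid hc hmem
        by_cases hemp : recipe.isEmpty
        · simp [pvLink, hemp]
        · simp only [pvLink, hemp, if_false, Bool.false_eq_true]
          cases hr : (PySem.Dict.get? (PySem.Dict.mk recipe) "root_recipe_id").getD none with
          | some r =>
            by_cases hr0 : r = 0
            · cases hp : (PySem.Dict.get? (PySem.Dict.mk recipe) "parent_recipe_id").getD none with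
              | some p =>
                by_cases hp0 : p = 0
                · simp [pvOrNone, hr0, hp0, pyTruthyInt]
                · have ihp := ih p (PySem.Set.add seen rid) (by omega)
                  simp [pvOrNone, hr0, hp0, pyTruthyInt, ihp]
              | none => simp [pvOrNone, hr0, pyTruthyInt]
            · simp [pvOrNone, hr0, pyTruthyInt]
          | none =>
            cases hp : (PySem.Dict.get? (PySem.Dict.mk recipe) "parent_recipe_id").getD none with
            | some p =>
              by_cases hp0 : p = 0
              · simp [pvOrNone, hp0, pyTruthyInt]
              · have ihp := ih p (PySem.Set.add seen rid) (by omega)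
                simp [pvOrNone, hp0, pyTruthyInt, ihp]
            | none => simp [pvOrNone, pyTruthyInt]

-- ===== VERDICT (by name: the statement is the Claim_ definition above) =====
theorem resolve_root_id_py_spec : Claim_equal_resolve_root_id_py := by
  intro recipe_id recipes seen _
  unfold Spec_resolve_root_id_py resolve_root_id_py_alt
  have hb : pvMeasure recipes seen ≤ recipes.length := by
    unfold pvMeasure; exact List.countP_le_length
  exact (loop_eq recipes (recipes.length + 1) recipe_id seen (by omega)).symm
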